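-- pv_equiv track=rewrite | github.com/miliar/Code_Jam_Webscraper | solutions_python/Problem_155/3356.py | compute_friends
-- ===== SOURCE A (Python) =====
-- def compute_friends(smax, s):
--     size = get_audience_size(s)
--     clapping = 0
--     friends = 0
--
--     for i in range(0,len(s)):
--
--         Si = int(s[i])
--
--         if clapping < i:
--             delta = i - clapping
--             friends = friends + delta
--             clapping = i
--
--         clapping = clapping + Si
--     return friends
--
-- def get_audience_size(s):
--     count = 0
--     for i in range(0,len(s)):
--         count = count + int(s[i])
--     return count
-- ===== SOURCE B (Python) =====
-- def compute_friends(smax, s):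
--     # Two-phase: build prefix sums of digits, then return the max deficit i - prefix_i.
--     prefixes = [0]
--     for c in s:
--         prefixes.append(prefixes[-1] + int(c))
--     return max((i - p for i, p in enumerate(prefixes[:len(s)])), default=0)
-- ===== Notes on version B (the rewrite author's own statement) =====
-- stated objective: alternative
-- what changed: B replaces A's single loop maintaining a combined clapping counter (friends added in deltas whenever clapping < i) with a two-phase decomposition: build the digit prefix-sum list, then return the maximum deficit i - prefix_i (default 0).
import Mathlib
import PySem

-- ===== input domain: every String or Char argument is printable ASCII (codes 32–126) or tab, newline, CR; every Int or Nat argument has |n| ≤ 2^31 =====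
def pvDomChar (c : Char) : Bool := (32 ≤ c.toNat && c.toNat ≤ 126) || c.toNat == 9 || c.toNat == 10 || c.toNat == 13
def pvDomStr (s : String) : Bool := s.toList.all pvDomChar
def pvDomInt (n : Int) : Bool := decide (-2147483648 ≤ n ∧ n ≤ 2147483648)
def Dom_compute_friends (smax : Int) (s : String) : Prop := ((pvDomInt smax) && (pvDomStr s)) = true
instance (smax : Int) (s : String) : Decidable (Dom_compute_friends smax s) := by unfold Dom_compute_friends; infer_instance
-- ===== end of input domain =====

-- B recomputes the answer in two phases (prefix-sum list, then maximum deficit i - prefix_i)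
-- instead of A's single loop with a combined clapping counter; objective: alternative decomposition.


-- ===== PORT A =====
-- int(c) for a single digit character (Pre_ guarantees '0' ≤ c ≤ '9', where this is exact)
def pvDigit (c : Char) : Int := (c.toNat : Int) - 48

def getAudienceSize (cs : List Char) (count : Int) : Int :=
  match cs with
  | [] => count
  | c :: rest => getAudienceSize rest (count + pvDigit c)

-- the loop of A: state (i, clapping, friends)
def aLoop (cs : List Char) (i clapping friends : Int) : Int :=
  match cs with
  | [] => friends
  | c :: rest =>
    let si := pvDigit c
    if clapping < i then
      aLoop rest (i + 1) (i + si) (friends + (i - clapping))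
    else
      aLoop rest (i + 1) (clapping + si) friends

def compute_friends (smax : Int) (s : String) : Int :=
  let _size := getAudienceSize s.toList 0
  aLoop s.toList 0 0 0

-- ===== PORT B =====
-- prefixes[:len(s)] = [0, d0, d0+d1, …] built front to back (Python appends to the list)
def prefList (cs : List Char) (p : Int) : List Int :=
  match cs with
  | [] => []
  | c :: rest => p :: prefList rest (p + pvDigit c)

-- Python: max(gen, default=0)
def pyMaxD (xs : List Int) : Int :=
  match xs with
  | [] => 0
  | x :: rest => rest.foldl max x

def compute_friends_alt (smax : Int) (s : String) : Int :=
  let ps := prefList s.toList 0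
  pyMaxD ((ps.zipIdx).map (fun pi => (pi.2 : Int) - pi.1))

-- ===== PRECONDITION & SPEC =====
-- Pre_ excludes strings containing a non-digit character, on which A's int(s[i]) raises ValueError.
def Pre_compute_friends (smax : Int) (s : String) : Prop :=
  (s.toList.all (fun c => 48 ≤ c.toNat && c.toNat ≤ 57)) = true
instance (smax : Int) (s : String) : Decidable (Pre_compute_friends smax s) := by
  unfold Pre_compute_friends; infer_instance
def pvWitness_compute_friends : Int × String := (3, "303")

def Spec_compute_friends (smax : Int) (s : String) (out : Int) : Prop := out = compute_friends_alt smax s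
instance (smax : Int) (s : String) (out : Int) : Decidable (Spec_compute_friends smax s out) := by unfold Spec_compute_friends; infer_instance

-- ===== CLAIM (what is proved, stated in full; the proofs are below) =====
def Claim_equal_compute_friends : Prop := ∀ (smax : Int) (s : String), Dom_compute_friends smax s → Pre_compute_friends smax s → Spec_compute_friends smax s (compute_friends smax s)

-- ===== LEMMAS AND PROOFS =====

-- the deficit list i - prefix_i, generated directly (proof-side reference object)
def dlist (cs : List Char) (i p : Int) : List Int :=
  match cs with
  | [] => []
  | c :: rest => (i - p) :: dlist rest (i + 1) (p + pvDigit c)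

-- A's loop maintains clapping = prefix + friends, and each step replaces friends by max friends (i - prefix)
theorem aLoop_eq_fold (cs : List Char) :
    ∀ i p f : Int, aLoop cs i (p + f) f = (dlist cs i p).foldl max f := by
  induction cs with
  | nil => intro i p f; simp [aLoop, dlist]
  | cons c rest ih =>
    intro i p f
    simp only [aLoop, dlist, List.foldl_cons]
    by_cases h : p + f < i
    · rw [if_pos h]
      have h1 : i + pvDigit c = (p + pvDigit c) + (i - p) := by ring
      have h2 : f + (i - (p + f)) = i - p := by ring
      have h3 : max f (i - p) = i - p := by omega
      rw [h1, h2, ih, h3]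
    · rw [if_neg h]
      have h1 : p + f + pvDigit c = (p + pvDigit c) + f := by ring
      have h3 : max f (i - p) = f := by omega
      rw [h1, ih, h3]

-- B's mapped-zipIdx deficit list equals dlist (at any offset)
theorem map_zipIdx_eq_dlist (cs : List Char) :
    ∀ (p : Int) (k : Nat),
      (((prefList cs p).zipIdx k).map (fun pi => (pi.2 : Int) - pi.1)) = dlist cs (k : Int) p := by
  induction cs with
  | nil => intro p k; simp [prefList, dlist]
  | cons c rest ih =>
    intro p k
    simp only [prefList, dlist, List.zipIdx_cons, List.map_cons]
    rw [ih (p + pvDigit c) (k + 1)]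
    push_cast
    ring_nf

-- ===== VERDICT (by name: the statement is the Claim_ definition above) =====
theorem compute_friends_spec : Claim_equal_compute_friends := by
  intro smax s _ _
  show compute_friends smax s = compute_friends_alt smax s
  simp only [compute_friends, compute_friends_alt]
  rw [map_zipIdx_eq_dlist s.toList 0 0]
  have h0 : aLoop s.toList 0 ((0 : Int) + 0) 0 = (dlist s.toList 0 0).foldl max 0 :=
    aLoop_eq_fold s.toList 0 0 0
  rw [show ((0:Int)+0) = 0 from rfl] at h0
  rw [h0]
  rcases hs : s.toList with _ | ⟨c, rest⟩
  · simp [dlist, pyMaxD]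
  · simp [dlist, pyMaxD]
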